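-- pv_equiv track=rewrite | github.com/miliar/Code_Jam_Webscraper | solutions_python/Problem_155/1871.py | compute
-- ===== SOURCE A (Python) =====
-- def compute(levels):
--     total_extra = 0
--     standing = 0
--     for level, count in enumerate(levels):
--         extra = max(0, level - standing)
--         standing += int(count) + extra
--         total_extra += extra
--     return total_extra
-- ===== SOURCE B (Python) =====
-- def compute(levels):
--     prefixes = []
--     acc = 0
--     for c in levels:
--         prefixes.append(acc)
--         acc += int(c)
--     deficits = [level - p for level, p in enumerate(prefixes)]
--     return max([0] + deficits)
-- ===== Notes on version B (the rewrite author's own statement) =====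
-- stated objective: alternative
-- what changed: Replaces A's single fold with coupled standing/total_extra state by staged passes: build the list of prefix sums of the counts, map it through enumerate to the deficits level - prefix, and return the maximum of 0 and those deficits, using the identity answer = max(0, max_i(i - prefix_i)).
import Mathlib
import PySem

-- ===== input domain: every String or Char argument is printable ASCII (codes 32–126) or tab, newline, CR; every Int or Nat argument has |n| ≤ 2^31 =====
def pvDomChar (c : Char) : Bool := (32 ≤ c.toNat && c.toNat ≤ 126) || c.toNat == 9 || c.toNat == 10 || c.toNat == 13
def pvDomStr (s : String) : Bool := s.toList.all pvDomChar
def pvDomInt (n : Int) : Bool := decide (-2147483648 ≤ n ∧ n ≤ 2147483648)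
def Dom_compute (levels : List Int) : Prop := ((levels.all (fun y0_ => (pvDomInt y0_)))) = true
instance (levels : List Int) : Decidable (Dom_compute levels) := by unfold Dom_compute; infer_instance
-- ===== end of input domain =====

-- B computes the answer in staged passes (prefix sums, then deficits, then a max)
-- instead of A's one fold with coupled standing/total_extra state; same O(n) cost, plainer invariant.

-- ===== PORT A =====
-- loop state: (level index, total_extra, standing)
def computeAuxA (i total standing : Int) : List Int → Int
  | [] => total
  | count :: rest =>
    let extra := max 0 (i - standing)
    computeAuxA (i + 1) (total + extra) (standing + count + extra) rest

def compute (levels : List Int) : Int := computeAuxA 0 0 0 levels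

-- ===== PORT B =====
-- pass 1: prefixes[k] = sum of the counts before index k
def prefixSums (acc : Int) : List Int → List Int
  | [] => []
  | c :: rest => acc :: prefixSums (acc + c) rest

-- pass 2: deficits by comprehension over enumerate; pass 3: max([0] + deficits)
def compute_alt (levels : List Int) : Int :=
  let prefixes := prefixSums 0 levels
  let deficits := (PySem.List.enumerate prefixes 0).map (fun p => p.1 - p.2)
  List.foldl max 0 deficits

-- ===== PRECONDITION & SPEC =====
def Spec_compute (levels : List Int) (out : Int) : Prop := out = compute_alt levels
instance (levels : List Int) (out : Int) : Decidable (Spec_compute levels out) := by unfold Spec_compute; infer_instance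

-- ===== CLAIM (what is proved, stated in full; the proofs are below) =====
def Claim_equal_compute : Prop := ∀ (levels : List Int), Dom_compute levels → Spec_compute levels (compute levels)

-- ===== LEMMAS AND PROOFS =====
-- proof-only helper: the deficits i - pfx produced along the list
def deficitsAux (i pfx : Int) : List Int → List Int
  | [] => []
  | c :: rest => (i - pfx) :: deficitsAux (i + 1) (pfx + c) rest

-- A's fold equals a max-fold over the deficits (invariant: standing = pfx + total)
theorem auxA_eq_foldl_max (ls : List Int) : ∀ (i best pfx : Int),
    computeAuxA i best (pfx + best) ls = List.foldl max best (deficitsAux i pfx ls) := by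
  induction ls with
  | nil => intro i best pfx; rfl
  | cons c rest ih =>
    intro i best pfx
    simp only [computeAuxA, deficitsAux, List.foldl]
    have h1 : best + max 0 (i - (pfx + best)) = max best (i - pfx) := by omega
    have h2 : pfx + best + c + max 0 (i - (pfx + best))
        = (pfx + c) + max best (i - pfx) := by omega
    rw [h1, h2, ih]

-- B's enumerate-map over the prefix sums is exactly those deficits
theorem map_enumerate_prefixSums (ls : List Int) : ∀ (i pfx : Int),
    (PySem.List.enumerate (prefixSums pfx ls) i).map (fun p => p.1 - p.2)
      = deficitsAux i pfx ls := by
  induction ls with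
  | nil => intro i pfx; rfl
  | cons c rest ih =>
    intro i pfx
    simp only [prefixSums, PySem.List.enumerate_cons, List.map, deficitsAux]
    rw [ih]

-- ===== VERDICT (by name: the statement is the Claim_ definition above) =====
theorem compute_spec : Claim_equal_compute := by
  intro levels _
  unfold Spec_compute compute compute_alt
  simp only [map_enumerate_prefixSums]
  have := auxA_eq_foldl_max levels 0 0 0
  simpa using this
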